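-- pv_equiv track=rewrite | github.com/Maricruz-GA/Variables-para-el-MIE | scripts-r/R_Julian/r_path_manifest_v0_3.py | split_base_relative
-- ===== SOURCE A (Python) =====
-- from typing import Dict, List, Optional, Tuple
--
-- def split_base_relative(path: str, candidate_bases: List[str]) -> Tuple[Optional[str], Optional[str]]:
--     best = None
--     for base in candidate_bases:
--         base_clean = base.rstrip('/')
--         if path == base_clean or path.startswith(base_clean + '/'):
--             if best is None or len(base_clean) > len(best):
--                 best = base_clean
--     if best is None:
--         return None, None
--     rel = path[len(best):].lstrip('/')
--     return best, rel
-- ===== SOURCE B (Python) =====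
-- from typing import List, Optional, Tuple
--
-- def split_base_relative(path: str, candidate_bases: List[str]) -> Tuple[Optional[str], Optional[str]]:
--     # Sort cleaned bases by length, longest first, then return at the first match.
--     cleaned = sorted((b.rstrip('/') for b in candidate_bases), key=len, reverse=True)
--     for base in cleaned:
--         if path == base or path.startswith(base + '/'):
--             return base, path[len(base):].lstrip('/')
--     return None, None
-- ===== Notes on version B (the rewrite author's own statement) =====
-- stated objective: alternative
-- what changed: Replaces A's single max-tracking scan with sort-the-cleaned-bases-by-length-descending followed by a short-circuiting first-match loop; ties are safe because equal-length matching prefixes of the same path are identical strings.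
import Mathlib
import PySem

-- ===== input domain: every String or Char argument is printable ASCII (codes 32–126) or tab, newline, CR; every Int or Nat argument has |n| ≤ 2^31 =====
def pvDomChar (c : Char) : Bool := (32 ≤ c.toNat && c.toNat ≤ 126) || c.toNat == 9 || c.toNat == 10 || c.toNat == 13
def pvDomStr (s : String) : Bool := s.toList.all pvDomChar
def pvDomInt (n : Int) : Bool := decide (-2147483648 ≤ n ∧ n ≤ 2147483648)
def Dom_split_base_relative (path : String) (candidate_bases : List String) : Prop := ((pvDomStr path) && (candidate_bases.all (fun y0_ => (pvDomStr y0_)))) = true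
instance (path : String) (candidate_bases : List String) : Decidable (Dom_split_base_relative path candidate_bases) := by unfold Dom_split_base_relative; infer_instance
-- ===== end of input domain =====

-- B replaces A's max-tracking scan by sorting the cleaned bases longest-first and returning at
-- the first match (objective: alternative decomposition, same result).

-- hand port of s.rstrip('/') (PySem has no chars-argument rstrip): drop trailing '/' — exact
def rstripSlash (cs : List Char) : List Char := (cs.reverse.dropWhile (· == '/')).reverse
-- hand port of s.lstrip('/'): drop leading '/' — exact
def lstripSlash (cs : List Char) : List Char := cs.dropWhile (· == '/')

-- ===== PORT A =====
def split_base_relative (path : String) (candidate_bases : List String) : Option String × Option String :=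
  let p := path.toList
  let best := candidate_bases.foldl
    (fun (best : Option (List Char)) base =>
      let base_clean := rstripSlash base.toList
      if p == base_clean || PySem.Chars.startswith p (base_clean ++ ['/']) then
        match best with
        | none => some base_clean
        | some b => if base_clean.length > b.length then some base_clean else some b
      else best) none
  match best with
  | none => (none, none)
  | some b =>
    (some (String.ofList b),
     some (String.ofList (lstripSlash (PySem.Chars.slice p (some ((b.length : Int))) none))))

-- ===== PORT B =====
-- the 'for base in cleaned: … return' loop of Source B
def altLoop (p : List Char) : List (List Char) → Option String × Option String
  | [] => (none, none)
  | base :: rest =>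
    if p == base || PySem.Chars.startswith p (base ++ ['/']) then
      (some (String.ofList base),
       some (String.ofList (lstripSlash (PySem.Chars.slice p (some ((base.length : Int))) none))))
    else altLoop p rest

def split_base_relative_alt (path : String) (candidate_bases : List String) : Option String × Option String :=
  altLoop path.toList
    (PySem.List.sorted (candidate_bases.map (fun b => rstripSlash b.toList))
      (fun b => b.length) true)

-- ===== PRECONDITION & SPEC =====
def Spec_split_base_relative (path : String) (candidate_bases : List String) (out : Option String × Option String) : Prop := out = split_base_relative_alt path candidate_bases
instance (path : String) (candidate_bases : List String) (out : Option String × Option String) : Decidable (Spec_split_base_relative path candidate_bases out) := by unfold Spec_split_base_relative; infer_instance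

-- ===== CLAIM (what is proved, stated in full; the proofs are below) =====
def Claim_equal_split_base_relative : Prop := ∀ (path : String) (candidate_bases : List String), Dom_split_base_relative path candidate_bases → Spec_split_base_relative path candidate_bases (split_base_relative path candidate_bases)

-- ===== LEMMAS AND PROOFS =====

-- the shared match test of both Pythons: path == b or path.startswith(b + '/')
def pmatch (p b : List Char) : Bool := p == b || PySem.Chars.startswith p (b ++ ['/'])

lemma pmatch_prefix {p b : List Char} (h : pmatch p b = true) : b <+: p := by
  unfold pmatch at h
  rcases Bool.or_eq_true_iff.mp h with h | h
  · exact (beq_iff_eq.mp h) ▸ List.prefix_refl b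
  · exact (List.prefix_append b ['/']).trans ((PySem.Chars.startswith_iff p _).mp h)

-- two matching cleaned bases of the same length are the same string
lemma pmatch_unique {p a b : List Char} (ha : pmatch p a = true) (hb : pmatch p b = true)
    (hlen : a.length = b.length) : a = b := by
  have h1 := List.prefix_iff_eq_take.mp (pmatch_prefix ha)
  have h2 := List.prefix_iff_eq_take.mp (pmatch_prefix hb)
  rw [h1, h2, hlen]

-- the body of A's loop
def gA (p : List Char) (best : Option (List Char)) (bc : List Char) : Option (List Char) :=
  if pmatch p bc then
    match best with
    | none => some bc
    | some b => if bc.length > b.length then some bc else some b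
  else best

-- A's fold returns none exactly when nothing matches
lemma foldA_none {p : List Char} (l : List (List Char)) (acc : Option (List Char)) :
    l.foldl (gA p) acc = none ↔ acc = none ∧ ∀ x ∈ l, pmatch p x = false := by
  induction l generalizing acc with
  | nil => simp
  | cons x t ih =>
    by_cases hx : pmatch p x = true
    · have hsome : ∃ c, gA p acc x = some c := by
        unfold gA
        rw [if_pos hx]
        cases acc with
        | none => exact ⟨x, rfl⟩
        | some b => by_cases h : x.length > b.length <;> simp [h]
      obtain ⟨c, hc⟩ := hsome
      simp only [List.foldl_cons, hc, ih]
      constructor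
      · rintro ⟨h, -⟩
        exact absurd h (by simp)
      · rintro ⟨-, h⟩
        have := h x (by simp)
        simp [hx] at this
    · have hkeep : gA p acc x = acc := by unfold gA; simp [hx]
      simp only [List.foldl_cons, hkeep, ih]
      constructor
      · rintro ⟨h1, h2⟩
        refine ⟨h1, ?_⟩
        intro y hy
        rcases List.mem_cons.mp hy with rfl | hy'
        · simpa using hx
        · exact h2 y hy'
      · rintro ⟨h1, h2⟩
        exact ⟨h1, fun y hy => h2 y (List.mem_cons_of_mem _ hy)⟩

-- A's fold returns a match of maximal length, drawn from the list (or the accumulator)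
lemma foldA_some {p : List Char} (l : List (List Char)) (acc : Option (List Char))
    (hacc : ∀ b, acc = some b → pmatch p b = true) (m : List Char)
    (h : l.foldl (gA p) acc = some m) :
    pmatch p m = true ∧ (∀ x ∈ l, pmatch p x = true → x.length ≤ m.length) ∧
      (∀ b, acc = some b → b.length ≤ m.length) ∧ (m ∈ l ∨ acc = some m) := by
  induction l generalizing acc with
  | nil =>
    simp only [List.foldl_nil] at h
    refine ⟨hacc m h, by simp, ?_, Or.inr h⟩
    intro b hb
    rw [h] at hb
    cases Option.some.inj hb
    exact le_refl _
  | cons x t ih =>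
    simp only [List.foldl_cons] at h
    by_cases hx : pmatch p x = true
    · have hstep : ∃ c, gA p acc x = some c ∧ pmatch p c = true ∧ x.length ≤ c.length ∧
          (∀ b, acc = some b → b.length ≤ c.length) ∧ (c = x ∨ acc = some c) := by
        unfold gA
        rw [if_pos hx]
        cases acc with
        | none => exact ⟨x, rfl, hx, le_refl _, by simp, Or.inl rfl⟩
        | some b =>
          by_cases hlt : x.length > b.length
          · refine ⟨x, by simp [hlt], hx, le_refl _, ?_, Or.inl rfl⟩
            intro b' hb'
            cases Option.some.inj hb'
            omega
          · refine ⟨b, by simp [hlt], hacc b rfl, by omega, ?_, Or.inr rfl⟩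
            intro b' hb'
            cases Option.some.inj hb'
            exact le_refl _
      obtain ⟨c, hc, hcm, hxc, hbc, hcx⟩ := hstep
      rw [hc] at h
      obtain ⟨h1, h2, h3, h4⟩ := ih (some c) (fun b hb => by cases Option.some.inj hb; exact hcm) h
      have hcm' : c.length ≤ m.length := h3 c rfl
      refine ⟨h1, ?_, fun b hb => le_trans (hbc b hb) hcm', ?_⟩
      · intro y hy hym
        rcases List.mem_cons.mp hy with rfl | hy'
        · omega
        · exact h2 y hy' hym
      · rcases h4 with hmt | hcm2
        · exact Or.inl (List.mem_cons_of_mem _ hmt)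
        · rcases hcx with rfl | hac
          · cases Option.some.inj hcm2
            exact Or.inl (by simp)
          · exact Or.inr (by rw [hac, hcm2])
    · have hkeep : gA p acc x = acc := by unfold gA; simp [hx]
      rw [hkeep] at h
      obtain ⟨h1, h2, h3, h4⟩ := ih acc hacc h
      refine ⟨h1, ?_, h3, ?_⟩
      · intro y hy hym
        rcases List.mem_cons.mp hy with rfl | hy'
        · exact absurd hym hx
        · exact h2 y hy' hym
      · rcases h4 with hmt | hacm
        · exact Or.inl (List.mem_cons_of_mem _ hmt)
        · exact Or.inr hacm

-- B's loop is find?-then-return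
lemma altLoop_eq (p : List Char) (s : List (List Char)) :
    altLoop p s = match s.find? (pmatch p) with
      | none => (none, none)
      | some b => (some (String.ofList b),
          some (String.ofList (lstripSlash (PySem.Chars.slice p (some ((b.length : Int))) none)))) := by
  induction s with
  | nil => rfl
  | cons x t ih =>
    show (if pmatch p x then _ else altLoop p t) = _
    rw [List.find?_cons]
    by_cases hx : pmatch p x = true
    · simp [hx]
    · simp only [Bool.not_eq_true] at hx
      simp [hx, ih]

-- in a length-descending list, the first match has maximal length among matches
lemma find?_desc_max {p : List Char} (s : List (List Char))
    (hs : s.Pairwise (fun a b => b.length ≤ a.length)) (m : List Char)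
    (h : s.find? (pmatch p) = some m) :
    ∀ x ∈ s, pmatch p x = true → x.length ≤ m.length := by
  induction s with
  | nil => simp at h
  | cons a t ih =>
    rcases List.pairwise_cons.mp hs with ⟨ha, ht⟩
    by_cases hx : pmatch p a = true
    · simp only [List.find?_cons, hx] at h
      cases Option.some.inj h
      intro y hy hym
      rcases List.mem_cons.mp hy with rfl | hy'
      · exact le_refl _
      · exact ha y hy'
    · simp only [Bool.not_eq_true] at hx
      simp only [List.find?_cons, hx] at h
      intro y hy hym
      rcases List.mem_cons.mp hy with rfl | hy'
      · exact absurd hym (by simp [hx])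
      · exact ih ht h y hy' hym

-- A rewritten through gA
lemma split_base_relative_eq (path : String) (candidate_bases : List String) :
    split_base_relative path candidate_bases =
      match (candidate_bases.map (fun b => rstripSlash b.toList)).foldl (gA path.toList) none with
      | none => (none, none)
      | some b => (some (String.ofList b),
          some (String.ofList (lstripSlash (PySem.Chars.slice path.toList (some ((b.length : Int))) none)))) := by
  unfold split_base_relative gA pmatch
  rw [List.foldl_map]

theorem split_base_relative_spec_aux (path : String) (candidate_bases : List String) :
    split_base_relative path candidate_bases = split_base_relative_alt path candidate_bases := by
  set p := path.toList with hp
  set cl := candidate_bases.map (fun b => rstripSlash b.toList) with hcl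
  set s := PySem.List.sorted cl (fun b => b.length) true with hs
  have hperm : s.Perm cl := PySem.List.sorted_perm cl _ true
  have hpair : s.Pairwise (fun a b => b.length ≤ a.length) :=
    PySem.List.sorted_pairwise_rev cl (fun b => b.length)
  rw [split_base_relative_eq]
  unfold split_base_relative_alt
  rw [altLoop_eq]
  cases hA : cl.foldl (gA p) none with
  | none =>
    have hnone := (foldA_none cl none).mp hA
    have : s.find? (pmatch p) = none := by
      rw [List.find?_eq_none]
      intro x hx
      simp [hnone.2 x (hperm.mem_iff.mp hx)]
    rw [this]
  | some m =>
    obtain ⟨hm, hmax, -, hmem'⟩ := foldA_some cl none (by simp) m hA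
    have hmem : m ∈ cl := by
      rcases hmem' with h | h
      · exact h
      · simp at h
    have hmemS : m ∈ s := hperm.mem_iff.mpr hmem
    cases hB : s.find? (pmatch p) with
    | none => exact absurd hm (by simpa using (List.find?_eq_none.mp hB) m hmemS)
    | some m' =>
      have hm' : pmatch p m' = true := List.find?_some hB
      have hmem' : m' ∈ cl := hperm.mem_iff.mp (List.mem_of_find?_eq_some hB)
      have h1 : m'.length ≤ m.length := hmax m' hmem' hm'
      have h2 : m.length ≤ m'.length := find?_desc_max s hpair m' hB m hmemS hm
      have : m = m' := pmatch_unique hm hm' (by omega)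
      rw [this]

-- ===== VERDICT (by name: the statement is the Claim_ definition above) =====
theorem split_base_relative_spec : Claim_equal_split_base_relative := by
  intro path candidate_bases _
  unfold Spec_split_base_relative
  exact split_base_relative_spec_aux path candidate_bases
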